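-- pv_equiv track=rewrite | github.com/sueszli/vector-database-benchmark | dataset/python-mutated/filesize.py | pick_unit_and_suffix
-- ===== SOURCE A (Python) =====
-- from typing import Iterable, List, Optional, Tuple
--
-- def pick_unit_and_suffix(size: int, suffixes: List[str], base: int) -> Tuple[int, str]:
--     if False:
--         i = 10
--         return i + 15
--     'Pick a suffix and base for the given size.'
--     for (i, suffix) in enumerate(suffixes):
--         unit = base ** i
--         if size < unit * base:
--             break
--     return (unit, suffix)
-- ===== SOURCE B (Python) =====
-- def pick_unit_and_suffix(size, suffixes, base):
--     'Pick a suffix and base for the given size.'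
--     i = 0
--     temp = size
--     while temp >= base and i < len(suffixes) - 1:
--         temp //= base
--         i += 1
--     return (base ** i, suffixes[i])
-- ===== Notes on version B (the rewrite author's own statement) =====
-- stated objective: simpler
-- what changed: B replaces A's enumerate-suffixes loop that builds increasing powers base**i and tests size < unit*base with a downward divide loop (temp //= base while temp >= base, index capped at len-1), then returns (base**i, suffixes[i]).
-- outside the precondition, e.g. on pick_unit_and_suffix(5, ['a', 'b'], 0): A returns (0, 'b'), B raises ZeroDivisionError; on pick_unit_and_suffix(5, ['a', 'b', 'c'], -2): A returns (4, 'c'), B returns (-2, 'b')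
import Mathlib
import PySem

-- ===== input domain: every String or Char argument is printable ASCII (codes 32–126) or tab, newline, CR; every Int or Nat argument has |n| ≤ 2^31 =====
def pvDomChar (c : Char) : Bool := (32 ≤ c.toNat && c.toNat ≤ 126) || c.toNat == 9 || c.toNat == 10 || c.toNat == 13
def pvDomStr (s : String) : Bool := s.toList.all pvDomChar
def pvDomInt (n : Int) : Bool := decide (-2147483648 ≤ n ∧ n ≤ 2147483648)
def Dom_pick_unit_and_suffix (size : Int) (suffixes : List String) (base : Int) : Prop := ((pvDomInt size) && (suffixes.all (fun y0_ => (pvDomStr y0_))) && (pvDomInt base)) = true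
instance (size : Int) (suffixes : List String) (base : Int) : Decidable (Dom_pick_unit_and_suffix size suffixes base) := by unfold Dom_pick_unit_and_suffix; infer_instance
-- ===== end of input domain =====

-- B: replaces A's upward power-building scan over suffixes with a downward divide loop; equal on Pre_ (nonempty suffixes, base ≥ 1).

-- ===== PORT A =====
-- A's for-loop over enumerate(suffixes): unit = base**i; break when size < unit*base.
-- The [] case is unreachable under Pre_ (the Python A raises UnboundLocalError there).
def pickLoopA (size base : Int) (i : Nat) : List String → Int × String
  | [] => (0, "")
  | [s] => (base ^ i, s)
  | s :: t :: rest =>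
    if size < base ^ i * base then (base ^ i, s)
    else pickLoopA size base (i + 1) (t :: rest)

def pick_unit_and_suffix (size : Int) (suffixes : List String) (base : Int) : Int × String :=
  pickLoopA size base 0 suffixes

-- ===== PORT B =====
-- the while loop `while temp >= base and i < len(suffixes)-1: temp //= base; i += 1`,
-- with `steps = (len(suffixes)-1) - i` as the structural fuel (exactly the i < len-1 bound).
def pickLoopB (base : Int) (temp : Int) (i : Nat) : Nat → Int × Nat
  | 0 => (temp, i)
  | steps + 1 =>
    if base ≤ temp then pickLoopB base (PySem.Int.floordiv temp base) (i + 1) steps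
    else (temp, i)

def pick_unit_and_suffix_alt (size : Int) (suffixes : List String) (base : Int) : Int × String :=
  let r := pickLoopB base size 0 (suffixes.length - 1)
  -- suffixes[r.2]: r.2 ≤ len-1 always, so getD's default is unreachable under Pre_
  (base ^ r.2, suffixes.getD r.2 "")

-- ===== PRECONDITION & SPEC =====
-- Pre_ excludes suffixes = [] (A raises UnboundLocalError, B raises IndexError) and base ≤ 0,
-- where A returns an accidental value from nonsensical powers while B either raises
-- ZeroDivisionError (base = 0) or returns a different, equally defensible value (negative
-- base): a unit base below 1 is outside the function's purpose and neither value is specified.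
def Pre_pick_unit_and_suffix (size : Int) (suffixes : List String) (base : Int) : Prop :=
  suffixes ≠ [] ∧ 1 ≤ base
instance (size : Int) (suffixes : List String) (base : Int) : Decidable (Pre_pick_unit_and_suffix size suffixes base) := by unfold Pre_pick_unit_and_suffix; infer_instance

def pvWitness_pick_unit_and_suffix : Int × List String × Int := (2500, ["B", "KB", "MB"], 1000)

def Spec_pick_unit_and_suffix (size : Int) (suffixes : List String) (base : Int) (out : Int × String) : Prop := out = pick_unit_and_suffix_alt size suffixes base
instance (size : Int) (suffixes : List String) (base : Int) (out : Int × String) : Decidable (Spec_pick_unit_and_suffix size suffixes base out) := by unfold Spec_pick_unit_and_suffix; infer_instance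

-- ===== CLAIM (what is proved, stated in full; the proofs are below) =====
def Claim_equal_pick_unit_and_suffix : Prop := ∀ (size : Int) (suffixes : List String) (base : Int), Dom_pick_unit_and_suffix size suffixes base → Pre_pick_unit_and_suffix size suffixes base → Spec_pick_unit_and_suffix size suffixes base (pick_unit_and_suffix size suffixes base)

-- ===== LEMMAS AND PROOFS =====

-- floor division by positive divisors composes
lemma fd_fd (x b c : Int) (hb : 0 < b) (hc : 0 < c) :
    PySem.Int.floordiv (PySem.Int.floordiv x b) c = PySem.Int.floordiv x (b * c) := by
  have hbc : 0 < b * c := mul_pos hb hc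
  have h1 : PySem.Int.floordiv (PySem.Int.floordiv x b) c * c ≤ PySem.Int.floordiv x b ∧
      PySem.Int.floordiv x b < (PySem.Int.floordiv (PySem.Int.floordiv x b) c + 1) * c :=
    (PySem.Int.floordiv_eq_iff_of_pos hc).1 rfl
  have h2 := (PySem.Int.le_floordiv_iff_mul_le hb).1 h1.1
  have h3 := (PySem.Int.floordiv_lt_iff_lt_mul hb).1 h1.2
  refine ((PySem.Int.floordiv_eq_iff_of_pos hbc).2 ⟨?_, ?_⟩).symm
  · nlinarith
  · nlinarith

-- the index accumulator of pickLoopB only shifts the second component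
lemma pickLoopB_shift (base : Int) : ∀ (steps : Nat) (temp : Int) (i : Nat),
    pickLoopB base temp i steps =
      ((pickLoopB base temp 0 steps).1, i + (pickLoopB base temp 0 steps).2) := by
  intro steps
  induction steps with
  | zero => intro temp i; simp [pickLoopB]
  | succ k ih =>
    intro temp i
    by_cases hc : base ≤ temp
    · simp only [pickLoopB, if_pos hc]
      rw [ih _ (i + 1), ih _ 1]
      rw [Nat.add_assoc]
    · simp [pickLoopB, hc]

-- core correspondence: A's scan over l starting at index i equals B's divide loop
-- started on temp = size // base^i with fuel (len l - 1)
lemma loop_eq (l : List String) : ∀ (size base : Int) (i : Nat), 1 ≤ base → l ≠ [] →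
    pickLoopA size base i l =
      ((base : Int) ^ (i + (pickLoopB base (PySem.Int.floordiv size (base ^ i)) 0 (l.length - 1)).2),
       l.getD (pickLoopB base (PySem.Int.floordiv size (base ^ i)) 0 (l.length - 1)).2 "") := by
  induction l with
  | nil => intro _ _ _ _ h; exact absurd rfl h
  | cons s t ih =>
    intro size base i hb _
    cases t with
    | nil => simp [pickLoopA, pickLoopB]
    | cons s2 rest =>
      have hpow : (0:Int) < base ^ i := pow_pos (by omega) i
      have hcond : (base ≤ PySem.Int.floordiv size (base ^ i)) ↔ ¬ (size < base ^ i * base) := by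
        rw [PySem.Int.le_floordiv_iff_mul_le hpow]
        constructor <;> intro h <;> nlinarith
      by_cases hlt : size < base ^ i * base
      · have hnc : ¬ base ≤ PySem.Int.floordiv size (base ^ i) := by rw [hcond]; simp [hlt]
        simp [pickLoopA, pickLoopB, hlt, hnc]
      · have hc : base ≤ PySem.Int.floordiv size (base ^ i) := hcond.2 hlt
        have hstep : PySem.Int.floordiv (PySem.Int.floordiv size (base ^ i)) base
            = PySem.Int.floordiv size (base ^ (i + 1)) := by
          rw [fd_fd _ _ _ hpow (by omega), pow_succ]
        have hih := ih size base (i + 1) hb (by simp)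
        simp only [pickLoopA, if_neg hlt, hih, pickLoopB, List.length_cons,
          Nat.add_sub_cancel, if_pos hc, hstep]
        rw [pickLoopB_shift base _ _ 1]
        obtain ⟨t', j⟩ := pickLoopB base (PySem.Int.floordiv size (base ^ (i + 1))) 0 rest.length
        rw [show i + 1 + j = i + (1 + j) from by omega, show 1 + j = j + 1 from by omega]
        simp [List.getD]

-- ===== VERDICT (by name: the statement is the Claim_ definition above) =====
theorem pick_unit_and_suffix_spec : Claim_equal_pick_unit_and_suffix := by
  intro size suffixes base _ hpre
  obtain ⟨hne, hb⟩ := hpre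
  unfold Spec_pick_unit_and_suffix pick_unit_and_suffix pick_unit_and_suffix_alt
  have := loop_eq suffixes size base 0 hb hne
  rw [this]
  simp
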